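-- pv_equiv track=rewrite | github.com/lingling0727/Co-AI-Track1 | trial3/geometry.py | _generate_diagonal_group
-- ===== SOURCE A (Python) =====
-- import itertools
--
-- def _generate_diagonal_group(k, q):
--     matrices = []
--     nonzero_elements = list(range(1, q))
--     for diag in itertools.product(nonzero_elements, repeat=k):
--         matrix = [[0]*k for _ in range(k)]
--         for i in range(k): matrix[i][i] = diag[i]
--         matrices.append(matrix)
--     return matrices
-- ===== SOURCE B (Python) =====
-- def _generate_diagonal_group(k, q):
--     # radix decoding: the n-th matrix's diagonal is the k digits of n in base q-1, plus 1
--     r = q - 1 if q > 1 else 0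
--     return [[[n // r ** (k - 1 - i) % r + 1 if i == j else 0
--               for j in range(k)]
--              for i in range(k)]
--             for n in range(r ** k)]
-- ===== Notes on version B (the rewrite author's own statement) =====
-- stated objective: alternative
-- what changed: B never enumerates tuples: it counts n from 0 to (q-1)^k-1 and computes each diagonal entry directly as the i-th base-(q-1) digit of n plus 1 (radix decoding), building the matrix positionally, instead of iterating itertools.product and mutating a zero matrix.
import Mathlib
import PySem

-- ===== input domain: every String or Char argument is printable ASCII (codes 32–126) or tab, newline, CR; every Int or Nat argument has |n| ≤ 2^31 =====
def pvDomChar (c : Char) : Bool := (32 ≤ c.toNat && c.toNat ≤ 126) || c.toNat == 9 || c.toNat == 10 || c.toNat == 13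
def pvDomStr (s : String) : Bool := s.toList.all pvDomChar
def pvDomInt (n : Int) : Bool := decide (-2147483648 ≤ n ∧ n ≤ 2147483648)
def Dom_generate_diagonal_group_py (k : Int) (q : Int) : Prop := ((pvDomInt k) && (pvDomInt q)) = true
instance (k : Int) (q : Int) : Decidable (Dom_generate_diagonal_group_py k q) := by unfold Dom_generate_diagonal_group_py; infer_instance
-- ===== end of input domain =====

-- B replaces itertools.product with radix decoding: the n-th matrix's diagonal entries are
-- computed directly as base-(q-1) digits of n plus 1; same cost, alternative algorithm.


-- ===== PORT A =====
-- itertools.product(pool, repeat=n): first coordinate varies slowest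
def pyProdRep (pool : List Int) : Nat → List (List Int)
  | 0 => [[]]
  | n+1 => pool.flatMap (fun x => (pyProdRep pool n).map (fun t => x :: t))

def generate_diagonal_group_py (k : Int) (q : Int) : List (List (List Int)) :=
  (pyProdRep (PySem.List.pyRange 1 q 1) k.toNat).map (fun diag =>
    -- matrix = [[0]*k for _ in range(k)]; for i in range(k): matrix[i][i] = diag[i]
    (List.range k.toNat).foldl
      (fun m i => m.set i ((m.getD i []).set i (diag.getD i 0)))
      (List.replicate k.toNat (List.replicate k.toNat 0)))

-- ===== PORT B =====
-- all quantities n, r^…, digits are nonnegative, so Nat / and % coincide with Python's // and %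
def generate_diagonal_group_py_alt (k : Int) (q : Int) : List (List (List Int)) :=
  let r : Nat := if q > 1 then (q - 1).toNat else 0
  (List.range (r ^ k.toNat)).map (fun n =>
    (List.range k.toNat).map (fun i =>
      (List.range k.toNat).map (fun j =>
        if i == j then ((n / r ^ (k.toNat - 1 - i) % r : Nat) : Int) + 1 else 0)))

-- ===== PRECONDITION & SPEC =====
-- Pre_ excludes k < 0, where A raises ValueError (itertools.product rejects a negative repeat).
def Pre_generate_diagonal_group_py (k : Int) (q : Int) : Prop := 0 ≤ k
instance (k : Int) (q : Int) : Decidable (Pre_generate_diagonal_group_py k q) := by unfold Pre_generate_diagonal_group_py; infer_instance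
def pvWitness_generate_diagonal_group_py : Int × Int := (2, 3)

def Spec_generate_diagonal_group_py (k : Int) (q : Int) (out : List (List (List Int))) : Prop := out = generate_diagonal_group_py_alt k q
instance (k : Int) (q : Int) (out : List (List (List Int))) : Decidable (Spec_generate_diagonal_group_py k q out) := by unfold Spec_generate_diagonal_group_py; infer_instance

-- ===== CLAIM (what is proved, stated in full; the proofs are below) =====
def Claim_equal_generate_diagonal_group_py : Prop := ∀ (k : Int) (q : Int), Dom_generate_diagonal_group_py k q → Pre_generate_diagonal_group_py k q → Spec_generate_diagonal_group_py k q (generate_diagonal_group_py k q)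

-- ===== LEMMAS AND PROOFS =====

-- counting in base b: List.range (a*b) split into a blocks of size b
lemma range_mul_flatMap (a b : Nat) :
    List.range (a * b) = (List.range a).flatMap (fun d => (List.range b).map (fun m => d * b + m)) := by
  induction a with
  | zero => simp
  | succ a ih =>
    rw [Nat.succ_mul, List.range_add, ih, List.range_succ, List.flatMap_append]
    simp

-- the Cartesian power of [1, …, r] is exactly radix decoding of 0 … r^n - 1
lemma pyProdRep_eq_decode (r n : Nat) :
    pyProdRep ((List.range r).map (fun (d : Nat) => 1 + (d : Int))) n
    = (List.range (r ^ n)).map (fun m =>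
        (List.range n).map (fun i => 1 + ((m / r ^ (n - 1 - i) % r : Nat) : Int))) := by
  induction n with
  | zero => simp [pyProdRep]
  | succ n ih =>
    rw [pyProdRep, ih, pow_succ', range_mul_flatMap r (r ^ n)]
    simp only [List.flatMap_map, List.map_flatMap, List.map_map, Function.comp_def]
    refine List.flatMap_congr ?_
    intro d hd
    rw [List.mem_range] at hd
    have hr : 0 < r := by omega
    apply List.map_congr_left
    intro m' hm'
    rw [List.mem_range] at hm'
    rw [List.range_succ_eq_map, List.map_cons, List.map_map]
    have hhead : (d * r ^ n + m') / r ^ (n + 1 - 1 - 0) % r = d := by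
      simp only [Nat.sub_zero, Nat.add_sub_cancel]
      have hcomm : d * r ^ n + m' = m' + d * r ^ n := by ring
      rw [hcomm, Nat.add_mul_div_right _ _ (pow_pos hr n), Nat.div_eq_of_lt hm',
        Nat.zero_add, Nat.mod_eq_of_lt hd]
    congr 1
    · exact (congrArg (fun t : Nat => 1 + (t : Int)) hhead).symm
    · apply List.map_congr_left
      intro i hi
      rw [List.mem_range] at hi
      simp only [Function.comp_def]
      have hidx : n + 1 - 1 - (i + 1) = n - 1 - i := by omega
      rw [hidx]
      have hdig : (d * r ^ n + m') / r ^ (n - 1 - i) % r = m' / r ^ (n - 1 - i) % r := by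
        have hp : r ^ n = r ^ (n - 1 - i) * r ^ (i + 1) := by
          rw [← pow_add]; congr 1; omega
        have hsplit : d * r ^ n + m' = m' + d * r ^ i * r * r ^ (n - 1 - i) := by
          rw [hp, pow_succ]; ring
        rw [hsplit, Nat.add_mul_div_right _ _ (pow_pos hr _), Nat.add_mul_mod_self_right]
      exact (congrArg (fun t : Nat => 1 + (t : Int)) hdig).symm

-- A's set-diagonal fold equals the positional construction, for ANY d
lemma fold_set_invariant (n : Nat) (d : List Int) (m : Nat) (hm : m ≤ n) :
    (List.range m).foldl (fun M i => M.set i ((M.getD i []).set i (d.getD i 0)))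
      (List.replicate n (List.replicate n 0))
    = (List.range n).map (fun i => if i < m then (List.replicate n (0:Int)).set i (d.getD i 0)
                                   else List.replicate n 0) := by
  induction m with
  | zero =>
    simp
  | succ m ih =>
    rw [List.range_succ, List.foldl_append, List.foldl_cons, List.foldl_nil, ih (by omega)]
    have hmn : m < n := hm
    have hgetD : ((List.range n).map (fun i => if i < m then (List.replicate n (0:Int)).set i (d.getD i 0)
          else List.replicate n 0)).getD m [] = List.replicate n 0 := by
      rw [List.getD_eq_getElem _ _ (by simp [hmn])]
      simp
    rw [hgetD]
    apply List.ext_getElem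
    · simp
    · intro i hi1 hi2
      simp only [List.length_set, List.length_map, List.length_range] at hi1 hi2
      rw [List.getElem_set]
      by_cases h : m = i
      · subst h
        simp
      · simp only [if_neg h]
        simp only [List.getElem_map, List.getElem_range]
        by_cases h2 : i < m
        · simp [h2, Nat.lt_succ_of_lt h2]
        · have : ¬ i < m + 1 := by omega
          simp [h2, this]

lemma matrix_eq (n : Nat) (d : List Int) :
    (List.range n).foldl (fun M i => M.set i ((M.getD i []).set i (d.getD i 0)))
      (List.replicate n (List.replicate n 0))
    = (List.range n).map (fun i => (List.range n).map (fun j => if i == j then d.getD i 0 else 0)) := by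
  rw [fold_set_invariant n d n le_rfl]
  apply List.map_congr_left
  intro i hi
  rw [List.mem_range] at hi
  simp only [hi, if_true]
  apply List.ext_getElem
  · simp
  · intro j hj1 hj2
    simp only [List.length_set, List.length_replicate] at hj1
    rw [List.getElem_set]
    simp only [List.getElem_map, List.getElem_range, List.getElem_replicate]
    by_cases h : i = j
    · simp [h]
    · have : (i == j) = false := by simp [h]
      simp [h, this]

-- ===== VERDICT (by name: the statement is the Claim_ definition above) =====
theorem generate_diagonal_group_py_spec : Claim_equal_generate_diagonal_group_py := by
  intro k q _ hk
  unfold Spec_generate_diagonal_group_py generate_diagonal_group_py generate_diagonal_group_py_alt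
  have hr : (if q > 1 then (q - 1).toNat else 0) = (q - 1).toNat := by
    split <;> omega
  simp only [hr, PySem.List.pyRange_one]
  rw [pyProdRep_eq_decode, List.map_map]
  apply List.map_congr_left
  intro m _
  simp only [Function.comp_def]
  rw [matrix_eq]
  apply List.map_congr_left
  intro i hi
  rw [List.mem_range] at hi
  apply List.map_congr_left
  intro j _
  have hgd : (((List.range k.toNat).map
      (fun i => 1 + ((m / (q - 1).toNat ^ (k.toNat - 1 - i) % (q - 1).toNat : Nat) : Int)))).getD i 0
      = 1 + ((m / (q - 1).toNat ^ (k.toNat - 1 - i) % (q - 1).toNat : Nat) : Int) := by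
    rw [List.getD_eq_getElem _ _ (by simp [hi])]
    simp
  rw [hgd]
  by_cases h : i = j <;> simp [h, Int.add_comm]
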